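-- pv_equiv track=rewrite | github.com/brendonsa/AOC2023 | 18/18.py | get_coordinates2
-- ===== SOURCE A (Python) =====
-- def get_coordinates2(moves, steps):
--     current_horizontal = 0
--     current_vertical = 0
--     x, y = [], []
--     for idx, (s, m) in enumerate(zip(steps, moves)):
--         if idx == len(steps)-1:
--             steps_next = steps[0]
--         else:
--             steps_next = steps[idx+1]
--         match s:
--             case 'R':
--                 current_horizontal += m
--                 if steps_next == 'U':
--                     x.append(current_horizontal+1)
--                     y.append(current_vertical-1)
--                 if steps_next == 'D':
--                     x.append(current_horizontal+1)
--                     y.append(current_vertical+1)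
--             case 'L':
--                 current_horizontal -= m
--                 x.append(current_horizontal)
--                 y.append(current_vertical)
--                 if steps_next == 'U':
--                     x.append(current_horizontal-1)
--                     y.append(current_vertical-1)
--                 if steps_next == 'D':
--                     x.append(current_horizontal-1)
--                     y.append(current_vertical+1)
--             case 'U':
--                 current_vertical += m
--                 if steps_next == 'R':
--                     x.append(current_horizontal-1)
--                     y.append(current_vertical+1)
--                 if steps_next == 'L':
--                     x.append(current_horizontal+1)
--                     y.append(current_vertical+1)
--             case 'D':
--                 current_vertical -= m
--                 if steps_next == 'R':
--                     x.append(current_horizontal-1)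
--                     y.append(current_vertical-1)
--                 if steps_next == 'L':
--                     x.append(current_horizontal+1)
--                     y.append(current_vertical-1)
--     return x, y
-- ===== SOURCE B (Python) =====
-- # B: two-pass decomposition -- first walk the path recording (dir, x, y) after
-- # each move, then emit corner-adjusted points via a pure per-step table and unzip.
--
-- def _corner(s, nxt, h, v):
--     if s == 'R':
--         return ([(h + 1, v - 1)] if nxt == 'U' else []) + \
--                ([(h + 1, v + 1)] if nxt == 'D' else [])
--     if s == 'L':
--         return [(h, v)] + \
--                ([(h - 1, v - 1)] if nxt == 'U' else []) + \
--                ([(h - 1, v + 1)] if nxt == 'D' else [])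
--     if s == 'U':
--         return ([(h - 1, v + 1)] if nxt == 'R' else []) + \
--                ([(h + 1, v + 1)] if nxt == 'L' else [])
--     if s == 'D':
--         return ([(h - 1, v - 1)] if nxt == 'R' else []) + \
--                ([(h + 1, v - 1)] if nxt == 'L' else [])
--     return []
--
-- def get_coordinates2(moves, steps):
--     # pass 1: positions after each move
--     h = v = 0
--     pos = []
--     for s, m in zip(steps, moves):
--         if s == 'R':
--             h += m
--         elif s == 'L':
--             h -= m
--         elif s == 'U':
--             v += m
--         elif s == 'D':
--             v -= m
--         pos.append((s, h, v))
--     # pass 2: emit corner points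
--     pts = []
--     for i, (s, ph, pv) in enumerate(pos):
--         nxt = steps[0] if i == len(steps) - 1 else steps[i + 1]
--         pts.extend(_corner(s, nxt, ph, pv))
--     return [p[0] for p in pts], [p[1] for p in pts]
-- ===== Notes on version B (the rewrite author's own statement) =====
-- stated objective: alternative
-- what changed: A interleaves position updates and coordinate emission in one loop mutating two result lists inside nested branches; B decomposes into a first pass that walks the path recording (direction, x, y) per move and a second pass that maps each recorded entry through a pure corner-point table and unzips the resulting point list.
import Mathlib
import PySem

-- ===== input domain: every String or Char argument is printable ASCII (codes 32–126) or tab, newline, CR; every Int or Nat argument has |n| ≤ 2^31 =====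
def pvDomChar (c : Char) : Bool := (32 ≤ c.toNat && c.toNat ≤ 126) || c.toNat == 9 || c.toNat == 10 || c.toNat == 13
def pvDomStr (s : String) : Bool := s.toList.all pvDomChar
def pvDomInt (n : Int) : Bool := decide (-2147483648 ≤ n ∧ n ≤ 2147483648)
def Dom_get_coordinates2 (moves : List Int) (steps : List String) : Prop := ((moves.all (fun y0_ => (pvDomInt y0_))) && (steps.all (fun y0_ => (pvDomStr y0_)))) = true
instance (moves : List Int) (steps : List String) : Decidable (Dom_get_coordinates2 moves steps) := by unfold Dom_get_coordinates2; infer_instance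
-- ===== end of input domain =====

-- B is a two-pass decomposition of A (walk recording positions, then emit corner
-- points from a pure table and unzip); same cost, objective: alternative structure.

-- 'steps[0] if i == len(steps)-1 else steps[i+1]' — identical expression in both Pythons
-- (the getD defaults are unreachable on the indices either loop produces).
def nextDir (steps : List String) (i : Int) : String :=
  if i = (steps.length : Int) - 1 then steps.getD 0 "" else steps.getD (i + 1).toNat ""

-- ===== PORT A =====
def stepA (steps : List String) (st : Int × Int × List Int × List Int)
    (p : Int × String × Int) : Int × Int × List Int × List Int :=
  match st with
  | (h, v, x, y) =>
    let s := p.2.1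
    let m := p.2.2
    let nxt := nextDir steps p.1
    if s = "R" then
      let h' := h + m
      let xy1 := if nxt = "U" then (x ++ [h' + 1], y ++ [v - 1]) else (x, y)
      let xy2 := if nxt = "D" then (xy1.1 ++ [h' + 1], xy1.2 ++ [v + 1]) else xy1
      (h', v, xy2.1, xy2.2)
    else if s = "L" then
      let h' := h - m
      let x1 := x ++ [h']
      let y1 := y ++ [v]
      let xy1 := if nxt = "U" then (x1 ++ [h' - 1], y1 ++ [v - 1]) else (x1, y1)
      let xy2 := if nxt = "D" then (xy1.1 ++ [h' - 1], xy1.2 ++ [v + 1]) else xy1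
      (h', v, xy2.1, xy2.2)
    else if s = "U" then
      let v' := v + m
      let xy1 := if nxt = "R" then (x ++ [h - 1], y ++ [v' + 1]) else (x, y)
      let xy2 := if nxt = "L" then (xy1.1 ++ [h + 1], xy1.2 ++ [v' + 1]) else xy1
      (h, v', xy2.1, xy2.2)
    else if s = "D" then
      let v' := v - m
      let xy1 := if nxt = "R" then (x ++ [h - 1], y ++ [v' - 1]) else (x, y)
      let xy2 := if nxt = "L" then (xy1.1 ++ [h + 1], xy1.2 ++ [v' - 1]) else xy1
      (h, v', xy2.1, xy2.2)
    else (h, v, x, y)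

def get_coordinates2 (moves : List Int) (steps : List String) : List Int × List Int :=
  let r := (PySem.List.enumerate (steps.zip moves) 0).foldl (stepA steps)
    (0, 0, ([] : List Int), ([] : List Int))
  (r.2.2.1, r.2.2.2)

-- ===== PORT B =====
def corner (s nxt : String) (h v : Int) : List (Int × Int) :=
  if s = "R" then
    (if nxt = "U" then [(h + 1, v - 1)] else []) ++ (if nxt = "D" then [(h + 1, v + 1)] else [])
  else if s = "L" then
    [(h, v)] ++ (if nxt = "U" then [(h - 1, v - 1)] else [])
      ++ (if nxt = "D" then [(h - 1, v + 1)] else [])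
  else if s = "U" then
    (if nxt = "R" then [(h - 1, v + 1)] else []) ++ (if nxt = "L" then [(h + 1, v + 1)] else [])
  else if s = "D" then
    (if nxt = "R" then [(h - 1, v - 1)] else []) ++ (if nxt = "L" then [(h + 1, v - 1)] else [])
  else []

def walkStep (st : Int × Int × List (String × Int × Int)) (p : String × Int) :
    Int × Int × List (String × Int × Int) :=
  match st with
  | (h, v, pos) =>
    let hv :=
      if p.1 = "R" then (h + p.2, v)
      else if p.1 = "L" then (h - p.2, v)
      else if p.1 = "U" then (h, v + p.2)
      else if p.1 = "D" then (h, v - p.2)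
      else (h, v)
    (hv.1, hv.2, pos ++ [(p.1, hv.1, hv.2)])

def get_coordinates2_alt (moves : List Int) (steps : List String) : List Int × List Int :=
  let w := (steps.zip moves).foldl walkStep (0, 0, [])
  let pts := (PySem.List.enumerate w.2.2 0).flatMap
    (fun ip => corner ip.2.1 (nextDir steps ip.1) ip.2.2.1 ip.2.2.2)
  (pts.map Prod.fst, pts.map Prod.snd)

-- ===== PRECONDITION & SPEC =====
def Spec_get_coordinates2 (moves : List Int) (steps : List String) (out : List Int × List Int) : Prop := out = get_coordinates2_alt moves steps
instance (moves : List Int) (steps : List String) (out : List Int × List Int) : Decidable (Spec_get_coordinates2 moves steps out) := by unfold Spec_get_coordinates2; infer_instance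

-- ===== CLAIM (what is proved, stated in full; the proofs are below) =====
def Claim_equal_get_coordinates2 : Prop := ∀ (moves : List Int) (steps : List String), Dom_get_coordinates2 moves steps → Spec_get_coordinates2 moves steps (get_coordinates2 moves steps)

-- ===== LEMMAS AND PROOFS =====

-- position update of one move (B's pass 1, as a pure function)
def upd (h v : Int) (s : String) (m : Int) : Int × Int :=
  if s = "R" then (h + m, v)
  else if s = "L" then (h - m, v)
  else if s = "U" then (h, v + m)
  else if s = "D" then (h, v - m)
  else (h, v)

def posList (h v : Int) : List (String × Int) → List (String × Int × Int)
  | [] => []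
  | (s, m) :: rest =>
    let hv := upd h v s m
    (s, hv.1, hv.2) :: posList hv.1 hv.2 rest

def finPos (h v : Int) : List (String × Int) → Int × Int
  | [] => (h, v)
  | (s, m) :: rest =>
    let hv := upd h v s m
    finPos hv.1 hv.2 rest

def emitFrom (steps : List String) (k : Int) (pos : List (String × Int × Int)) : List (Int × Int) :=
  (PySem.List.enumerate pos k).flatMap
    (fun ip => corner ip.2.1 (nextDir steps ip.1) ip.2.2.1 ip.2.2.2)

lemma emitFrom_nil (steps : List String) (k : Int) : emitFrom steps k [] = [] := by
  simp [emitFrom, PySem.List.enumerate_nil]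

lemma emitFrom_cons (steps : List String) (k : Int) (s : String) (h v : Int)
    (rest : List (String × Int × Int)) :
    emitFrom steps k ((s, h, v) :: rest)
      = corner s (nextDir steps k) h v ++ emitFrom steps (k + 1) rest := by
  simp [emitFrom, PySem.List.enumerate_cons]

-- one step of A = B's position update plus appending the corner points of that step
lemma stepA_eq (steps : List String) (h v : Int) (x y : List Int) (k : Int)
    (s : String) (m : Int) :
    stepA steps (h, v, x, y) (k, s, m)
      = ((upd h v s m).1, (upd h v s m).2,
         x ++ (corner s (nextDir steps k) (upd h v s m).1 (upd h v s m).2).map Prod.fst,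
         y ++ (corner s (nextDir steps k) (upd h v s m).1 (upd h v s m).2).map Prod.snd) := by
  simp only [stepA, upd, corner]
  split_ifs <;> simp

-- A's fold over the enumerated list, characterised via posList/finPos/emitFrom
lemma foldA_eq (steps : List String) :
    ∀ (l : List (String × Int)) (k h v : Int) (x y : List Int),
      (PySem.List.enumerate l k).foldl (stepA steps) (h, v, x, y)
        = ((finPos h v l).1, (finPos h v l).2,
           x ++ (emitFrom steps k (posList h v l)).map Prod.fst,
           y ++ (emitFrom steps k (posList h v l)).map Prod.snd) := by
  intro l
  induction l with
  | nil => intro k h v x y; simp [PySem.List.enumerate_nil, finPos, posList, emitFrom_nil]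
  | cons p rest ih =>
    intro k h v x y
    obtain ⟨s, m⟩ := p
    rcases hU : upd h v s m with ⟨h', v'⟩
    rw [PySem.List.enumerate_cons, List.foldl_cons, stepA_eq, hU, ih]
    simp [posList, finPos, hU, emitFrom_cons, List.append_assoc]

-- B's first pass accumulates exactly posList and ends at finPos
lemma foldB_eq :
    ∀ (l : List (String × Int)) (h v : Int) (pos : List (String × Int × Int)),
      l.foldl walkStep (h, v, pos)
        = ((finPos h v l).1, (finPos h v l).2, pos ++ posList h v l) := by
  intro l
  induction l with
  | nil => intro h v pos; simp [finPos, posList]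
  | cons p rest ih =>
    intro h v pos
    obtain ⟨s, m⟩ := p
    have hstep : walkStep (h, v, pos) (s, m)
        = ((upd h v s m).1, (upd h v s m).2, pos ++ [(s, (upd h v s m).1, (upd h v s m).2)]) := by
      simp only [walkStep, upd]
    rw [List.foldl_cons, hstep, ih]
    simp [posList, finPos, List.append_assoc]

-- ===== VERDICT (by name: the statement is the Claim_ definition above) =====
theorem get_coordinates2_spec : Claim_equal_get_coordinates2 := by
  intro moves steps _
  unfold Spec_get_coordinates2 get_coordinates2 get_coordinates2_alt
  rw [foldA_eq, foldB_eq]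
  simp [emitFrom]
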